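-- pv_equiv track=rewrite | github.com/tnchsyn/transferlearningHIVprotease | WGCN_Train.py | get_external_drug_indexes
-- ===== SOURCE A (Python) =====
-- def get_external_drug_indexes(L,U,B):
--     B1=[]
--     A1=[]
--     for i in range(B):
--         if i>=L and i<=U:
--             A1.append(i)
--         else:
--             B1.append(i)
--     return A1,B1
-- ===== SOURCE B (Python) =====
-- def get_external_drug_indexes(L, U, B):
--     lo = max(L, 0)
--     hi = min(U, B - 1)
--     if lo > hi:
--         return [], list(range(B))
--     return list(range(lo, hi + 1)), list(range(0, lo)) + list(range(hi + 1, B))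
-- ===== Notes on version B (the rewrite author's own statement) =====
-- stated objective: simpler
-- what changed: Replaces the per-index scan-and-test loop with direct range arithmetic: clamp [L,U] against [0,B) and return the middle range plus the two flanking ranges.
import Mathlib
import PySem

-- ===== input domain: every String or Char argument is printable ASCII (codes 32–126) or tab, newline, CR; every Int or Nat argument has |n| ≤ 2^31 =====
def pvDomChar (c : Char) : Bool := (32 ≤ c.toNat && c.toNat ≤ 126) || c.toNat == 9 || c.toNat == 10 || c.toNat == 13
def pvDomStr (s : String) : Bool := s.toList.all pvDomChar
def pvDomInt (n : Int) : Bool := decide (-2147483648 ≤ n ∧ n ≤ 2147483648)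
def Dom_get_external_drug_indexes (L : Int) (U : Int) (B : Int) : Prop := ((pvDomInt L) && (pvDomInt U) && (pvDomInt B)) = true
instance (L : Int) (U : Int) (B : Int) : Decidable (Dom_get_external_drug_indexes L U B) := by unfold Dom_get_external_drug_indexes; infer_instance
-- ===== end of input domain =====

-- B replaces A's per-index scan-and-test with direct range arithmetic (clamp [L,U] to [0,B) and
-- concatenate the flanking ranges); objective: simpler.

-- ===== PORT A =====
-- loop 'for i in range(B): if i>=L and i<=U: A1.append(i) else B1.append(i)' as a foldl over (A1, B1)
def get_external_drug_indexes (L : Int) (U : Int) (B : Int) : List Int × List Int :=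
  (PySem.List.pyRange 0 B 1).foldl
    (fun (s : List Int × List Int) i =>
      if L ≤ i ∧ i ≤ U then (s.1 ++ [i], s.2) else (s.1, s.2 ++ [i]))
    ([], [])

-- ===== PORT B =====
def get_external_drug_indexes_alt (L : Int) (U : Int) (B : Int) : List Int × List Int :=
  let lo := max L 0
  let hi := min U (B - 1)
  if lo > hi then ([], PySem.List.pyRange 0 B 1)
  else (PySem.List.pyRange lo (hi + 1) 1,
        PySem.List.pyRange 0 lo 1 ++ PySem.List.pyRange (hi + 1) B 1)

-- ===== PRECONDITION & SPEC =====
def Spec_get_external_drug_indexes (L : Int) (U : Int) (B : Int) (out : List Int × List Int) : Prop := out = get_external_drug_indexes_alt L U B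
instance (L : Int) (U : Int) (B : Int) (out : List Int × List Int) : Decidable (Spec_get_external_drug_indexes L U B out) := by unfold Spec_get_external_drug_indexes; infer_instance

-- ===== CLAIM (what is proved, stated in full; the proofs are below) =====
def Claim_equal_get_external_drug_indexes : Prop := ∀ (L : Int) (U : Int) (B : Int), Dom_get_external_drug_indexes L U B → Spec_get_external_drug_indexes L U B (get_external_drug_indexes L U B)

-- ===== LEMMAS AND PROOFS =====

-- A's two-accumulator loop computes the pair (filter p, filter ¬p), each prefixed by the start state.
lemma foldl_pair_filter (p : Int → Prop) [DecidablePred p] (l : List Int) (a b : List Int) :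
    l.foldl (fun (s : List Int × List Int) i =>
      if p i then (s.1 ++ [i], s.2) else (s.1, s.2 ++ [i])) (a, b)
    = (a ++ l.filter (fun i => decide (p i)), b ++ l.filter (fun i => !decide (p i))) := by
  induction l generalizing a b with
  | nil => simp
  | cons x xs ih =>
    by_cases h : p x <;> simp [h, ih]

theorem get_external_drug_indexes_spec : Claim_equal_get_external_drug_indexes := by
  intro L U B _
  unfold Spec_get_external_drug_indexes get_external_drug_indexes get_external_drug_indexes_alt
  rw [foldl_pair_filter (fun i => L ≤ i ∧ i ≤ U)]
  simp only [List.nil_append]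
  by_cases hc : max L 0 > min U (B - 1)
  · simp only [hc, if_pos]
    have h1 : (PySem.List.pyRange 0 B 1).filter (fun i => decide (L ≤ i ∧ i ≤ U)) = [] := by
      rw [List.filter_eq_nil_iff]
      intro x hx
      rw [PySem.List.mem_pyRange_one] at hx
      simp only [decide_eq_true_eq]
      omega
    have h2 : (PySem.List.pyRange 0 B 1).filter (fun i => !decide (L ≤ i ∧ i ≤ U))
        = PySem.List.pyRange 0 B 1 := by
      rw [List.filter_eq_self]
      intro x hx
      rw [PySem.List.mem_pyRange_one] at hx
      simp only [Bool.not_eq_eq_eq_not, Bool.not_true, decide_eq_false_iff_not]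
      omega
    rw [h1, h2]
  · simp only [hc, if_neg, not_false_eq_true]
    rw [not_lt] at hc
    have h1 : (0 : Int) ≤ max L 0 := by omega
    have h2 : max L 0 ≤ min U (B - 1) + 1 := by omega
    have h3 : min U (B - 1) + 1 ≤ B := by omega
    rw [PySem.List.pyRange_one_append 0 (max L 0) B h1 (by omega),
        PySem.List.pyRange_one_append (max L 0) (min U (B - 1) + 1) B h2 h3]
    simp only [List.filter_append]
    have hlow_none : (PySem.List.pyRange 0 (max L 0) 1).filter
        (fun i => decide (L ≤ i ∧ i ≤ U)) = [] := by
      rw [List.filter_eq_nil_iff]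
      intro x hx; rw [PySem.List.mem_pyRange_one] at hx
      simp only [decide_eq_true_eq]; omega
    have hlow_all : (PySem.List.pyRange 0 (max L 0) 1).filter
        (fun i => !decide (L ≤ i ∧ i ≤ U)) = PySem.List.pyRange 0 (max L 0) 1 := by
      rw [List.filter_eq_self]
      intro x hx; rw [PySem.List.mem_pyRange_one] at hx
      simp only [Bool.not_eq_eq_eq_not, Bool.not_true, decide_eq_false_iff_not]; omega
    have hmid_all : (PySem.List.pyRange (max L 0) (min U (B - 1) + 1) 1).filter
        (fun i => decide (L ≤ i ∧ i ≤ U)) = PySem.List.pyRange (max L 0) (min U (B - 1) + 1) 1 := by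
      rw [List.filter_eq_self]
      intro x hx; rw [PySem.List.mem_pyRange_one] at hx
      simp only [decide_eq_true_eq]; omega
    have hmid_none : (PySem.List.pyRange (max L 0) (min U (B - 1) + 1) 1).filter
        (fun i => !decide (L ≤ i ∧ i ≤ U)) = [] := by
      rw [List.filter_eq_nil_iff]
      intro x hx; rw [PySem.List.mem_pyRange_one] at hx
      simp only [Bool.not_eq_eq_eq_not, Bool.not_true, decide_eq_false_iff_not]; omega
    have hhi_none : (PySem.List.pyRange (min U (B - 1) + 1) B 1).filter
        (fun i => decide (L ≤ i ∧ i ≤ U)) = [] := by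
      rw [List.filter_eq_nil_iff]
      intro x hx; rw [PySem.List.mem_pyRange_one] at hx
      simp only [decide_eq_true_eq]; omega
    have hhi_all : (PySem.List.pyRange (min U (B - 1) + 1) B 1).filter
        (fun i => !decide (L ≤ i ∧ i ≤ U)) = PySem.List.pyRange (min U (B - 1) + 1) B 1 := by
      rw [List.filter_eq_self]
      intro x hx; rw [PySem.List.mem_pyRange_one] at hx
      simp only [Bool.not_eq_eq_eq_not, Bool.not_true, decide_eq_false_iff_not]; omega
    rw [hlow_none, hlow_all, hmid_all, hmid_none, hhi_none, hhi_all]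
    simp
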